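-- pv_equiv track=rewrite | github.com/Ocean-2930/coding_test | 260121_Lv5_beauty_of_string.py | solution
-- ===== SOURCE A (Python) =====
-- def solution(s):
--     answer = 0
--     tot = len(s)
--     for i in range(tot):
--         c = s[i]
--         for j in range(tot-i):
--             beauty = j
--             while 0 < beauty:
--                 if c == s[i + beauty]:
--                     beauty -= 1
--                 else:
--                     answer += beauty
--                     break
--     return answer
-- ===== SOURCE B (Python) =====
-- def solution(s):
--     n = len(s)
--     total = 0
--     for i in range(n):
--         c = s[i]
--         last = 0
--         for j in range(n - i):
--             if s[i + j] != c:
--                 last = j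
--             total += last
--     return total
-- ===== Notes on version B (the rewrite author's own statement) =====
-- stated objective: faster
-- what changed: replaces the inner downward while-scan per (i,j) pair by a single forward pass per i that tracks the last mismatch position, since the pair's contribution is exactly the largest b<=j with s[i+b]!=s[i]
import Mathlib
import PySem

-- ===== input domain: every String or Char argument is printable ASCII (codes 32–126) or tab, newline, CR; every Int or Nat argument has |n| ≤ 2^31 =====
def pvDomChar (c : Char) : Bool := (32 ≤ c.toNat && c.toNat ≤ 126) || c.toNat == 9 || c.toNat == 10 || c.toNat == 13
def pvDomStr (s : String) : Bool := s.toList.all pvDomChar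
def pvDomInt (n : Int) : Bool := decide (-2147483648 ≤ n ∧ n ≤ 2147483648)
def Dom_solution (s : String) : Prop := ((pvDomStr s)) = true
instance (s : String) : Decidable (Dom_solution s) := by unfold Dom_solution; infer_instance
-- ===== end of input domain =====

-- B replaces A's per-(i,j) downward while-scan by one forward pass per i tracking the
-- last mismatch position (objective: faster, O(n^2) instead of O(n^3)).

-- ===== PORT A =====
-- the 'while 0 < beauty' loop: returns the amount added to answer (0 if the loop
-- exhausts beauty down to 0). All indices i+beauty are in range, so getD is exact here.
def pvWhileA (l : List Char) (c : Char) (i : Nat) : Nat → Int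
  | 0 => 0
  | Nat.succ b => if c == l.getD (i + (b + 1)) ' ' then pvWhileA l c i b else ((b : Int) + 1)

def solution (s : String) : Int :=
  let l := s.toList
  let tot := l.length
  (List.range tot).foldl (fun answer i =>
    let c := l.getD i ' '
    (List.range (tot - i)).foldl (fun answer j => answer + pvWhileA l c i j) answer) 0

-- ===== PORT B =====
-- inner loop of B over j = 0 .. n-1, state (total-so-far, last mismatch position)
def pvInnerB (l : List Char) (c : Char) (i n : Nat) : Int × Int :=
  (List.range n).foldl (fun st j =>
    let last := if l.getD (i + j) ' ' != c then (j : Int) else st.2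
    (st.1 + last, last)) (0, 0)

def solution_alt (s : String) : Int :=
  let l := s.toList
  let n := l.length
  (List.range n).foldl (fun total i =>
    total + (pvInnerB l (l.getD i ' ') i (n - i)).1) 0

-- ===== PRECONDITION & SPEC =====
def Spec_solution (s : String) (out : Int) : Prop := out = solution_alt s
instance (s : String) (out : Int) : Decidable (Spec_solution s out) := by unfold Spec_solution; infer_instance

-- ===== CLAIM (what is proved, stated in full; the proofs are below) =====
def Claim_equal_solution : Prop := ∀ (s : String), Dom_solution s → Spec_solution s (solution s)

-- ===== LEMMAS AND PROOFS =====

-- B's running "last" after processing j = 0 .. n-1 equals A's while-loop value at n-1,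
-- and B's total is the sum of A's while-loop values.
theorem pvInnerB_eq (l : List Char) (c : Char) (i : Nat) :
    ∀ n, pvInnerB l c i n =
      ((List.range n).foldl (fun a j => a + pvWhileA l c i j) 0, pvWhileA l c i (n - 1)) := by
  intro n
  induction n with
  | zero => simp [pvInnerB, pvWhileA]
  | succ m ih =>
    unfold pvInnerB at ih ⊢
    rw [List.range_succ, List.foldl_append, List.foldl_append, ih]
    simp only [List.foldl_cons, List.foldl_nil, Nat.add_sub_cancel]
    by_cases h : c = l.getD (i + m) ' '
    · cases m with
      | zero => simp [pvWhileA, bne, h]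
      | succ k => simp [pvWhileA, bne, h]
    · have h' : (l.getD (i + m) ' ' != c) = true := by
        simp [bne]; exact fun e => h e.symm
      cases m with
      | zero => simp [pvWhileA]
      | succ k =>
        have h2 : (c == l.getD (i + (k + 1)) ' ') = false := by
          simp; exact h
        simp only [pvWhileA, h', h2]
        simp

theorem pvInner_fst (l : List Char) (c : Char) (i n : Nat) :
    (pvInnerB l c i n).1 = (List.range n).foldl (fun a j => a + pvWhileA l c i j) 0 := by
  rw [pvInnerB_eq]

-- folding '+ f j' from accumulator a equals a plus the fold from 0
theorem pv_foldl_add (f : Nat → Int) (xs : List Nat) :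
    ∀ a : Int, xs.foldl (fun a j => a + f j) a = a + xs.foldl (fun a j => a + f j) 0 := by
  induction xs with
  | nil => simp
  | cons x xs ih =>
    intro a
    simp only [List.foldl_cons]
    rw [ih, ih (0 + f x)]
    ring

-- per-i contributions agree, hence the outer folds agree
theorem pv_outer (l : List Char) :
    (List.range l.length).foldl (fun answer i =>
        (List.range (l.length - i)).foldl
          (fun answer j => answer + pvWhileA l (l.getD i ' ') i j) answer) 0
      = (List.range l.length).foldl (fun total i =>
          total + (pvInnerB l (l.getD i ' ') i (l.length - i)).1) 0 := by
  congr 1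
  funext a i
  rw [pvInner_fst, pv_foldl_add]

-- ===== VERDICT (by name: the statement is the Claim_ definition above) =====
theorem solution_spec : Claim_equal_solution := by
  intro s _
  unfold Spec_solution solution solution_alt
  exact pv_outer s.toList
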